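-- pv_equiv track=rewrite | github.com/ajay-1110/Python-Coderbyte-Challenges | Array Challenges/symbol_check.py | symbolcheck
-- ===== SOURCE A (Python) =====
-- def symbolcheck(strn):
--     x = 'abcdefghijklmnopqrstuvwxyz'
--     if strn[0] in x or strn[-1] in x:
--         return False
--     for i in range(1,len(strn)-1):
--         if strn[i] in x:
--             if strn[i-1] != '+' or  strn[i+1] != '+':
--                 return False
--     return True
-- ===== SOURCE B (Python) =====
-- def symbolcheck(strn):
--     letters = 'abcdefghijklmnopqrstuvwxyz'
--     def has_letter(part):
--         return any(c in letters for c in part)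
--     parts = strn.split('+')
--     if has_letter(parts[0]) or has_letter(parts[-1]):
--         return False
--     return all(len(p) == 1 or not has_letter(p) for p in parts[1:-1])
-- ===== Notes on version B (the rewrite author's own statement) =====
-- stated objective: alternative
-- what changed: Replaced the neighbour-index scan by splitting the string on '+' and judging the segments: the first and last segment must contain no lowercase letter, and every interior segment must be a single character or letter-free.
import Mathlib
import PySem

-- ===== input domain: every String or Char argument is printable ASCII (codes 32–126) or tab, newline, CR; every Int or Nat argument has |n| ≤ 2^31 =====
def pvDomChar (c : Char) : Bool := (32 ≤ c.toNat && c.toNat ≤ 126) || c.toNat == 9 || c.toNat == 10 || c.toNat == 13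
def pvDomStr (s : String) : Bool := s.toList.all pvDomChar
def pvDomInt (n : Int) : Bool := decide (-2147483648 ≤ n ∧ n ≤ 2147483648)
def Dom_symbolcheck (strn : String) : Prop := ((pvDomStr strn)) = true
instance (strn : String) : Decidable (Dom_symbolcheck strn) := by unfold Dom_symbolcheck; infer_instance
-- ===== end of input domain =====

-- B replaces A's neighbour-index scan by splitting the string on '+' and judging the segments; objective: alternative algorithm, same O(n) cost.

-- ===== PORT A =====
-- x = 'abcdefghijklmnopqrstuvwxyz'
def pvLettersA : List Char := "abcdefghijklmnopqrstuvwxyz".toList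

-- for i in range(1, len(strn)-1): if strn[i] in x: if strn[i-1] != '+' or strn[i+1] != '+': return False
-- (pyGetD's default is never read: every index produced by the range is in bounds)
def symbolcheckLoopA (cs : List Char) : List Int → Bool
  | [] => true
  | i :: rest =>
    if PySem.List.pyGetD cs i ' ' ∈ pvLettersA then
      if PySem.List.pyGetD cs (i - 1) ' ' ≠ '+' ∨ PySem.List.pyGetD cs (i + 1) ' ' ≠ '+' then
        false
      else symbolcheckLoopA cs rest
    else symbolcheckLoopA cs rest

def symbolcheck (strn : String) : Bool :=
  let cs := strn.toList
  match PySem.Str.pyGet? strn 0, PySem.Str.pyGet? strn (-1) with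
  | some c0, some cl =>
    if c0 ∈ pvLettersA ∨ cl ∈ pvLettersA then false
    else symbolcheckLoopA cs (PySem.List.pyRange 1 ((cs.length : Int) - 1) 1)
  | _, _ => false  -- unreachable: Python raises IndexError on the empty string, excluded by Pre_

-- ===== PORT B =====
-- letters = 'abcdefghijklmnopqrstuvwxyz'
def pvLettersB : List Char := "abcdefghijklmnopqrstuvwxyz".toList

-- has_letter(part) = any(c in letters for c in part)
def pvHasLetter (p : List Char) : Bool := p.any (fun c => decide (c ∈ pvLettersB))

-- parts = strn.split('+'); reject a letter in the first or last segment; every interior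
-- segment must be a single character or letter-free.
def symbolcheck_alt (strn : String) : Bool :=
  let parts := strn.toList.splitOn '+'
  if pvHasLetter (PySem.List.pyGetD parts 0 []) || pvHasLetter (PySem.List.pyGetD parts (-1) []) then
    false
  else
    (PySem.List.slice parts (some 1) (some (-1))).all
      (fun p => decide (p.length = 1) || !pvHasLetter p)

-- ===== PRECONDITION & SPEC =====
-- Pre_ excludes only the empty string, on which A raises IndexError (strn[0]).
def Pre_symbolcheck (strn : String) : Prop := strn ≠ ""
instance (strn : String) : Decidable (Pre_symbolcheck strn) := by unfold Pre_symbolcheck; infer_instance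
def pvWitness_symbolcheck : String := "+a+"

def Spec_symbolcheck (strn : String) (out : Bool) : Prop := out = symbolcheck_alt strn
instance (strn : String) (out : Bool) : Decidable (Spec_symbolcheck strn out) := by unfold Spec_symbolcheck; infer_instance

-- ===== CLAIM (what is proved, stated in full; the proofs are below) =====
def Claim_equal_symbolcheck : Prop := ∀ (strn : String), Dom_symbolcheck strn → Pre_symbolcheck strn → Spec_symbolcheck strn (symbolcheck strn)

-- ===== LEMMAS AND PROOFS =====

theorem pvLetters_eq : pvLettersB = pvLettersA := rfl

-- The common specification both ports are reduced to: a one-pass automaton over the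
-- characters carrying the previous character (none at the start); a lowercase letter is
-- accepted only between a previous '+' and a following '+'.
def pvScan : Option Char → List Char → Bool
  | _, [] => true
  | prev, c :: rest =>
    (if c ∈ pvLettersA then decide (prev = some '+') && decide (rest.head? = some '+') else true)
      && pvScan (some c) rest

-- window form of A's interior loop
def pvWin : List Char → Bool
  | a :: b :: c :: rest =>
    if b ∈ pvLettersA ∧ (a ≠ '+' ∨ c ≠ '+') then false
    else pvWin (b :: c :: rest)
  | _ => true
  termination_by l => l.length

def pvLastLetter (rest : List Char) : Bool :=
  match rest.getLast? with
  | none => false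
  | some c => decide (c ∈ pvLettersA)

-- === A-side: A's index loop = the window scan, and the window scan + guards = pvScan ===

-- A's loop over the index range starting at k+1 computes the window scan over the suffix cs.drop k.
theorem pvLoop_eq (cs : List Char) (k : Nat) :
    symbolcheckLoopA cs (PySem.List.pyRange ((k : Int) + 1) ((cs.length : Int) - 1) 1)
      = pvWin (cs.drop k) := by
  have hlen : (cs.drop k).length = cs.length - k := List.length_drop
  match hd : cs.drop k with
  | [] =>
    have : cs.length ≤ k := by
      have := hlen; rw [hd] at this; simp at this; omega
    have hempty : ((cs.length : Int) - 1) - ((k : Int) + 1) ≤ 0 := by omega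
    simp [PySem.List.pyRange_one, Int.toNat_of_nonpos hempty, symbolcheckLoopA, pvWin]
  | [a] =>
    have : cs.length - k = 1 := by rw [hd] at hlen; simpa using hlen.symm
    have hempty : ((cs.length : Int) - 1) - ((k : Int) + 1) ≤ 0 := by omega
    simp [PySem.List.pyRange_one, Int.toNat_of_nonpos hempty, symbolcheckLoopA, pvWin]
  | [a, b] =>
    have : cs.length - k = 2 := by rw [hd] at hlen; simpa using hlen.symm
    have hk : k < cs.length := by omega
    have hempty : ((cs.length : Int) - 1) - ((k : Int) + 1) ≤ 0 := by omega
    simp [PySem.List.pyRange_one, Int.toNat_of_nonpos hempty, symbolcheckLoopA, pvWin]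
  | a :: b :: c :: rest =>
    have hlen3 : cs.length - k = rest.length + 3 := by
      rw [hd] at hlen; simpa using hlen.symm
    have hk0 : k < cs.length := by omega
    have hk1 : k + 1 < cs.length := by omega
    have hk2 : k + 2 < cs.length := by omega
    have ha : cs[k] = a := by
      have h := (List.getElem?_drop (xs := cs) (i := k) (j := 0)).symm
      rw [hd] at h; simp at h
      simpa [List.getElem?_eq_getElem hk0] using h
    have hb : cs[k + 1] = b := by
      have h := (List.getElem?_drop (xs := cs) (i := k) (j := 1)).symm
      rw [hd] at h; simp at h
      simpa [List.getElem?_eq_getElem hk1] using h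
    have hc : cs[k + 2] = c := by
      have h := (List.getElem?_drop (xs := cs) (i := k) (j := 2)).symm
      rw [hd] at h; simp at h
      simpa [List.getElem?_eq_getElem hk2] using h
    have hdrop : cs.drop (k + 1) = b :: c :: rest := by
      rw [← List.tail_drop, hd]; rfl
    have hcons : PySem.List.pyRange ((k : Int) + 1) ((cs.length : Int) - 1) 1
        = ((k : Int) + 1) :: PySem.List.pyRange (((k : Int) + 1) + 1) ((cs.length : Int) - 1) 1 :=
      PySem.List.pyRange_one_cons (by omega)
    have hgb : PySem.List.pyGetD cs ((k : Int) + 1) ' ' = b := by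
      rw [show ((k : Int) + 1) = ((k + 1 : Nat) : Int) by push_cast; ring]
      rw [PySem.List.pyGetD_natCast, List.getD_eq_getElem _ _ hk1, hb]
    have hga : PySem.List.pyGetD cs (((k : Int) + 1) - 1) ' ' = a := by
      rw [show (((k : Int) + 1) - 1) = ((k : Nat) : Int) by ring]
      rw [PySem.List.pyGetD_natCast, List.getD_eq_getElem _ _ hk0, ha]
    have hgc : PySem.List.pyGetD cs (((k : Int) + 1) + 1) ' ' = c := by
      rw [show (((k : Int) + 1) + 1) = ((k + 2 : Nat) : Int) by push_cast; ring]
      rw [PySem.List.pyGetD_natCast, List.getD_eq_getElem _ _ hk2, hc]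
    have hIH := pvLoop_eq cs (k + 1)
    rw [hdrop] at hIH
    rw [show (((k : Int) + 1) + 1) = ((k + 1 : Nat) : Int) + 1 by push_cast; ring] at hgc
    rw [hcons]
    show symbolcheckLoopA cs _ = pvWin (a :: b :: c :: rest)
    rw [symbolcheckLoopA, pvWin, hga, hgb]
    rw [show (((k : Int) + 1) + 1) = ((k + 1 : Nat) : Int) + 1 by push_cast; ring, hgc, hIH]
    by_cases h1 : b ∈ pvLettersA <;> by_cases h2 : a ≠ '+' ∨ c ≠ '+' <;> simp [h1, h2]
  termination_by cs.length - k
  decreasing_by omega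

theorem pvScan_win (a : Char) (rest : List Char) :
    pvScan (some a) rest = (pvWin (a :: rest) && !pvLastLetter rest) := by
  match rest with
  | [] => simp [pvScan, pvWin, pvLastLetter]
  | [b] =>
    by_cases hb : b ∈ pvLettersA <;>
      simp [pvScan, pvWin, pvLastLetter, hb]
  | b :: c :: r =>
    have hIH := pvScan_win b (c :: r)
    rw [pvScan, hIH, pvWin]
    have hlast : pvLastLetter (b :: c :: r) = pvLastLetter (c :: r) := by
      simp [pvLastLetter, List.getLast?_cons_cons]
    rw [hlast]
    by_cases hb : b ∈ pvLettersA <;> by_cases hac : a ≠ '+' ∨ c ≠ '+'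
    · simp [hb, hac]
      intro h1 h2 _
      rcases hac with h | h
      · exact absurd h1 h
      · exact absurd h2 h
    · rw [not_or] at hac
      simp only [not_not] at hac
      simp [hb, hac.1, hac.2]
    · simp [hb, hac]
    · simp [hb, hac]
  termination_by rest.length

-- indexing / slicing of the parts list
theorem pvGetNeg1? {α : Type} (x : α) (l : List α) :
    PySem.List.pyGet? (x :: l) (-1) = (x :: l).getLast? := by
  rw [List.getLast?_eq_getElem?]
  simp [PySem.List.pyGet?, PySem.List.pyIdx?]

theorem pvGet0 {α : Type} (x : α) (l : List α) (d : α) :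
    PySem.List.pyGetD (x :: l) 0 d = x := by
  simp [PySem.List.pyGetD, PySem.List.pyGet?, PySem.List.pyIdx?]

theorem pvGetNeg1 {α : Type} (x : α) (l : List α) (d : α) :
    PySem.List.pyGetD (x :: l) (-1) d = ((x :: l).getLast?).getD d := by
  rw [PySem.List.pyGetD, pvGetNeg1?]

theorem pvSlice1Neg1 {α : Type} (x : α) (l : List α) :
    PySem.List.slice (x :: l) (some 1) (some (-1)) = l.dropLast := by
  simp only [PySem.List.slice, PySem.List.clampIdx]
  norm_num
  rw [if_neg (show ¬((l.length : Int) < 0) by omega)]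
  rw [List.dropLast_eq_take]

-- A as the automaton, on nonempty strings
theorem pvA_eq (s : String) (h : s.toList ≠ []) : symbolcheck s = pvScan none s.toList := by
  obtain ⟨c0, rest, hcs⟩ := List.exists_cons_of_ne_nil h
  have h0 : PySem.Str.pyGet? s 0 = some c0 := by
    simp only [PySem.Str.pyGet?_eq]
    rw [hcs]
    simp [PySem.List.pyGet?, PySem.List.pyIdx?]
  have h1 : PySem.Str.pyGet? s (-1) = some ((c0 :: rest).getLast (by simp)) := by
    simp only [PySem.Str.pyGet?_eq, PySem.Chars.pyGet?_eq_listPyGet?]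
    rw [hcs, pvGetNeg1?, List.getLast?_eq_some_getLast (by simp)]
  unfold symbolcheck
  rw [h0, h1]
  dsimp only
  rw [hcs]
  have hwin := pvLoop_eq s.toList 0
  simp only [Int.natCast_zero, zero_add, List.drop_zero] at hwin
  rw [hcs] at hwin
  rw [hwin]
  have hscan : pvScan none (c0 :: rest)
      = ((if c0 ∈ pvLettersA then false else true) && pvScan (some c0) rest) := by
    by_cases hc : c0 ∈ pvLettersA <;> simp [pvScan, hc]
  rw [hscan, pvScan_win]
  match rest with
  | [] =>
    by_cases hc : c0 ∈ pvLettersA <;> simp [pvWin, pvLastLetter, hc]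
  | d :: r =>
    have hll : pvLastLetter (d :: r)
        = decide ((c0 :: d :: r).getLast (by simp) ∈ pvLettersA) := by
      unfold pvLastLetter
      rw [List.getLast?_eq_some_getLast (l := d :: r) (by simp)]
      simp [List.getLast_cons]
    rw [hll]
    by_cases hc : c0 ∈ pvLettersA <;>
      by_cases hl : (c0 :: d :: r).getLast (by simp) ∈ pvLettersA <;>
      simp [hc, hl, Bool.and_comm]

-- === B-side: the split-based check = pvScan ===

-- every nonempty list of characters is '+'-free or splits off a '+'-free first segment
theorem pvDecomp (cs : List Char) :
    ('+' ∉ cs) ∨ ∃ p rest, cs = p ++ '+' :: rest ∧ '+' ∉ p := by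
  cases hd : cs.dropWhile (fun c => c != '+') with
  | nil =>
    left
    intro hmem
    have hsplit := List.takeWhile_append_dropWhile (p := fun c => c != '+') (l := cs)
    rw [hd, List.append_nil] at hsplit
    rw [← hsplit] at hmem
    have := List.mem_takeWhile_imp hmem
    simp at this
  | cons c r =>
    right
    have hc : (c != '+') = false := by
      have := List.head_dropWhile_not (fun c => c != '+') (l := cs) (by simp [hd])
      simpa [hd] using this
    have hc' : c = '+' := by simpa using hc
    refine ⟨cs.takeWhile (fun c => c != '+'), r, ?_, ?_⟩
    · conv_lhs => rw [← List.takeWhile_append_dropWhile (p := fun c => c != '+') (l := cs)]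
      rw [hd, hc']
    · intro hmem
      have := List.mem_takeWhile_imp hmem
      simp at this

theorem pvSplitOn_single (p : List Char) (hp : '+' ∉ p) : p.splitOn '+' = [p] := by
  apply List.splitOnP_eq_single
  intro x hx
  simp only [beq_iff_eq]
  exact fun h => hp (h ▸ hx)

theorem pvSplitOn_cons (p rest : List Char) (hp : '+' ∉ p) :
    (p ++ '+' :: rest).splitOn '+' = p :: rest.splitOn '+' := by
  apply List.splitOnP_first
  · intro x hx
    simp only [beq_iff_eq]
    exact fun h => hp (h ▸ hx)
  · simp

-- a '+'-free tail after a non-'+' previous character is accepted iff it has no letter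
theorem pvScan_noplus (p : List Char) (prev : Option Char) (hp : '+' ∉ p)
    (hprev : prev ≠ some '+') : pvScan prev p = !pvHasLetter p := by
  match p with
  | [] => simp [pvScan, pvHasLetter]
  | c :: r =>
    have hc : c ≠ '+' := fun h => hp (h ▸ List.mem_cons_self)
    have hr : '+' ∉ r := fun h => hp (List.mem_cons_of_mem _ h)
    have hIH := pvScan_noplus r (some c) hr (by simpa using hc)
    rw [pvScan, hIH]
    by_cases hcl : c ∈ pvLettersA
    · simp [pvHasLetter, hprev, hcl, pvLetters_eq, Bool.and_assoc]
    · simp [pvHasLetter, hcl, pvLetters_eq, Bool.and_assoc]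

-- a final '+'-free segment after a '+' is accepted iff it has no letter
theorem pvScan_plus_noplus (p : List Char) (hp : '+' ∉ p) :
    pvScan (some '+') p = !pvHasLetter p := by
  match p with
  | [] => simp [pvScan, pvHasLetter]
  | [c] =>
    by_cases hcl : c ∈ pvLettersA <;>
      simp [pvScan, pvHasLetter, hcl, pvLetters_eq, Bool.and_assoc]
  | c :: d :: r =>
    have hc : c ≠ '+' := fun h => hp (h ▸ List.mem_cons_self)
    have hd : d ≠ '+' := fun h => hp (List.mem_cons_of_mem _ (h ▸ List.mem_cons_self))
    have hdr : '+' ∉ (d :: r) := fun h => hp (List.mem_cons_of_mem _ h)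
    have htail := pvScan_noplus (d :: r) (some c) hdr (by simpa using hc)
    rw [pvScan, htail]
    by_cases hcl : c ∈ pvLettersA
    · simp [pvHasLetter, hcl, hd, pvLetters_eq, Bool.and_assoc]
    · simp [pvHasLetter, hcl, pvLetters_eq, Bool.and_assoc]

-- a '+'-free first segment: accepted iff letter-free, then continue after the '+'
theorem pvScan_seg (p : List Char) (prev : Option Char) (rest : List Char) (hp : '+' ∉ p)
    (hprev : prev ≠ some '+') :
    pvScan prev (p ++ '+' :: rest) = (!pvHasLetter p && pvScan (some '+') rest) := by
  match p with
  | [] =>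
    have : ('+' : Char) ∉ pvLettersA := by decide
    simp [pvScan, pvHasLetter, this]
  | c :: q =>
    have hc : c ≠ '+' := fun h => hp (h ▸ List.mem_cons_self)
    have hq : '+' ∉ q := fun h => hp (List.mem_cons_of_mem _ h)
    have hIH := pvScan_seg q (some c) rest hq (by simpa using hc)
    rw [List.cons_append, pvScan, hIH]
    by_cases hcl : c ∈ pvLettersA
    · simp [pvHasLetter, hprev, hcl, pvLetters_eq, Bool.and_assoc]
    · simp [pvHasLetter, hcl, pvLetters_eq, Bool.and_assoc]

-- a '+'-free interior segment: accepted iff a single character or letter-free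
theorem pvScan_plus_seg (p : List Char) (rest : List Char) (hp : '+' ∉ p) :
    pvScan (some '+') (p ++ '+' :: rest)
      = ((decide (p.length = 1) || !pvHasLetter p) && pvScan (some '+') rest) := by
  match p with
  | [] =>
    have : ('+' : Char) ∉ pvLettersA := by decide
    simp [pvScan, pvHasLetter, this]
  | [c] =>
    have hplus : ('+' : Char) ∉ pvLettersA := by decide
    by_cases hcl : c ∈ pvLettersA <;>
      simp [pvScan, pvHasLetter, hcl, hplus]
  | c :: d :: q =>
    have hc : c ≠ '+' := fun h => hp (h ▸ List.mem_cons_self)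
    have hd : d ≠ '+' := fun h => hp (List.mem_cons_of_mem _ (h ▸ List.mem_cons_self))
    have hdq : '+' ∉ (d :: q) := fun h => hp (List.mem_cons_of_mem _ h)
    have htail := pvScan_seg (d :: q) (some c) rest hdq (by simpa using hc)
    rw [List.cons_append, pvScan, htail]
    by_cases hcl : c ∈ pvLettersA
    · simp [pvHasLetter, hcl, hd, pvLetters_eq, Bool.and_assoc]
    · simp [pvHasLetter, hcl, pvLetters_eq, Bool.and_assoc]

-- B's tail check: last segment letter-free, interior segments ok
def pvBmid (rest : List Char) : Bool :=
  let pr := rest.splitOn '+'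
  !pvHasLetter ((pr.getLast?).getD [])
    && pr.dropLast.all (fun p => decide (p.length = 1) || !pvHasLetter p)

theorem pvBmid_eq (rest : List Char) : pvBmid rest = pvScan (some '+') rest := by
  rcases pvDecomp rest with h | ⟨p, r2, hEq, hp⟩
  · rw [pvScan_plus_noplus rest h]
    unfold pvBmid
    rw [pvSplitOn_single rest h]
    simp
  · have hlt : r2.length < rest.length := by
      rw [hEq]; simp [List.length_append]; omega
    have hIH := pvBmid_eq r2
    obtain ⟨q, qs, hpr2⟩ := List.exists_cons_of_ne_nil
      (List.splitOnP_ne_nil (fun c => c == '+') r2)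
    rw [hEq, pvScan_plus_seg p r2 hp, ← hIH]
    unfold pvBmid
    rw [pvSplitOn_cons p r2 hp]
    simp only [List.splitOn] at hpr2 ⊢
    rw [hpr2]
    simp only [List.getLast?_cons_cons, List.dropLast_cons₂, List.all_cons]
    cases hq1 : pvHasLetter ((q :: qs).getLast?.getD []) <;>
      cases hq2 : (decide (p.length = 1) || !pvHasLetter p) <;>
        simp [hq1, hq2, Bool.and_comm, Bool.and_left_comm]
  termination_by rest.length

-- B as the automaton
theorem pvB_eq (s : String) : symbolcheck_alt s = pvScan none s.toList := by
  unfold symbolcheck_alt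
  dsimp only
  rcases pvDecomp s.toList with h | ⟨p, r2, hEq, hp⟩
  · rw [pvScan_noplus s.toList none h (by simp)]
    rw [pvSplitOn_single s.toList h]
    rw [pvGet0, pvGetNeg1, pvSlice1Neg1]
    cases hx : pvHasLetter s.toList <;> simp [hx]
  · rw [hEq, pvScan_seg p none r2 hp (by simp), ← pvBmid_eq r2]
    rw [pvSplitOn_cons p r2 hp]
    obtain ⟨q, qs, hpr2⟩ := List.exists_cons_of_ne_nil
      (List.splitOnP_ne_nil (fun c => c == '+') r2)
    unfold pvBmid
    simp only [List.splitOn] at hpr2 ⊢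
    rw [hpr2, pvGet0, pvGetNeg1, pvSlice1Neg1]
    simp only [List.getLast?_cons_cons, List.dropLast_cons₂, List.all_cons]
    cases h1 : pvHasLetter p <;>
      cases h2 : pvHasLetter ((q :: qs).getLast?.getD []) <;>
        simp [h1, h2, Bool.and_comm, Bool.and_left_comm]

-- ===== VERDICT (by name: the statement is the Claim_ definition above) =====
theorem symbolcheck_spec : Claim_equal_symbolcheck := by
  intro strn _ hpre
  unfold Spec_symbolcheck
  have hne : strn.toList ≠ [] := by
    intro h
    exact hpre (by simpa using h)
  rw [pvA_eq strn hne, pvB_eq strn]
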